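-- pv_equiv track=rewrite | github.com/annelisegoldman/DeMMOworkflow | IPR_filter.py | IPR_filter
-- ===== SOURCE A (Python) =====
-- def IPR_filter(IPRdict, pos_list, neg_list): # Filters ORFS for IPRs matching true (but not false) IPR signatures
--   posdict = {}
--   filtdict = {}
--   pos_set = set(pos_list)
--   neg_set = set(neg_list)
--   # Create dictionary (posdict) containing only ORFs with at least one true associated IPR signature
--   for key, val in IPRdict.items():
--     val_set = set(val)
--     if len(val_set.intersection(pos_set)) > 0:
--       posdict[key] = val
--   # Create dictionary containing only ORFs with at least one true IPR signature but not one of the false IPR signatures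
--   for key, val in posdict.items():
--     val_set = set(val)
--     if len(val_set.intersection(neg_set)) == 0:
--      filtdict[key] = val
--   return filtdict
-- ===== SOURCE B (Python) =====
-- def IPR_filter(IPRdict, pos_list, neg_list):
--     # Inverted index: signature -> list of ORF keys carrying it.
--     pairs = [(sig, key) for key, val in IPRdict.items() for sig in val]
--     index = {}
--     for sig, key in pairs:
--         index.setdefault(sig, []).append(key)
--     # Key-sets reached from the positive / negative signature lists.
--     pos_keys = set()
--     for sig in dict.fromkeys(pos_list):
--         pos_keys.update(index.get(sig, []))
--     neg_keys = set()
--     for sig in dict.fromkeys(neg_list):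
--         neg_keys.update(index.get(sig, []))
--     # Keep entries whose key is reached by a positive but no negative signature.
--     return {key: val for key, val in IPRdict.items() if key in pos_keys and key not in neg_keys}
-- ===== Notes on version B (the rewrite author's own statement) =====
-- stated objective: alternative
-- what changed: B builds an inverted index from IPR signature to ORF keys and derives the sets of keys hit by positive and negative signatures by iterating over pos_list/neg_list, then keeps entries by key membership; A instead intersects each ORF's signature set with pos/neg sets in two sequential passes with an intermediate posdict.
import Mathlib
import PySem

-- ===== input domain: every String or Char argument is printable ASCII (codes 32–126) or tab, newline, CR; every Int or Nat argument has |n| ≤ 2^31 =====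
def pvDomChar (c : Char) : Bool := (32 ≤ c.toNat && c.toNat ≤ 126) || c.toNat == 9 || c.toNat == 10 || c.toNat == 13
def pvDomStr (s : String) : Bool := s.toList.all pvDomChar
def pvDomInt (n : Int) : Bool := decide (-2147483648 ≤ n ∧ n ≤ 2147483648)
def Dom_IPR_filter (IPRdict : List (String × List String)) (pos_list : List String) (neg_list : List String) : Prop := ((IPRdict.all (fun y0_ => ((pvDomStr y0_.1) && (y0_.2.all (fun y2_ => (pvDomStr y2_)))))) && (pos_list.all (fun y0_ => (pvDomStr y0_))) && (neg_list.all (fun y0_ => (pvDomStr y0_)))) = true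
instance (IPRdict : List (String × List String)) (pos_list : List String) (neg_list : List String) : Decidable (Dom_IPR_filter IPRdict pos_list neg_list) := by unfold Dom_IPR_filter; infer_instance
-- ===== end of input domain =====

-- B replaces A's two filtering passes with pos/neg set intersections by an inverted
-- index (signature -> ORF keys) queried from pos_list/neg_list, then membership filtering.


-- ===== PORT A =====
def IPR_filter (IPRdict : List (String × List String)) (pos_list : List String) (neg_list : List String) : List (String × List String) :=
  let pos_set : PySem.Set String := PySem.Set.ofList pos_list
  let neg_set : PySem.Set String := PySem.Set.ofList neg_list
  -- for key, val in IPRdict.items(): keep in posdict if val_set & pos_set nonempty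
  let posdict : PySem.Dict String (List String) :=
    IPRdict.foldl (fun d kv =>
      let val_set : PySem.Set String := PySem.Set.ofList kv.2
      if (PySem.Set.inter val_set pos_set).length > 0 then d.insert kv.1 kv.2 else d)
      PySem.Dict.empty
  -- for key, val in posdict.items(): keep in filtdict if val_set & neg_set empty
  let filtdict : PySem.Dict String (List String) :=
    posdict.items.foldl (fun d kv =>
      let val_set : PySem.Set String := PySem.Set.ofList kv.2
      if (PySem.Set.inter val_set neg_set).length = 0 then d.insert kv.1 kv.2 else d)
      PySem.Dict.empty
  filtdict.items

-- ===== PORT B =====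
def IPR_filter_alt (IPRdict : List (String × List String)) (pos_list : List String) (neg_list : List String) : List (String × List String) :=
  -- pairs = [(sig, key) for key, val in IPRdict.items() for sig in val]
  let pairs : List (String × String) := IPRdict.flatMap (fun kv => kv.2.map (fun sig => (sig, kv.1)))
  -- index.setdefault(sig, []).append(key)
  let index : PySem.Dict String (List String) :=
    pairs.foldl (fun d p => d.modify p.1 [] (· ++ [p.2])) PySem.Dict.empty
  -- pos_keys.update(index.get(sig, [])) over pos_list
  let pos_keys : PySem.Set String :=
    (PySem.List.dedup pos_list).foldl (fun s sig => PySem.Set.update s (index.getD sig [])) PySem.Set.empty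
  let neg_keys : PySem.Set String :=
    (PySem.List.dedup neg_list).foldl (fun s sig => PySem.Set.update s (index.getD sig [])) PySem.Set.empty
  -- {key: val for key, val in IPRdict.items() if key in pos_keys and key not in neg_keys}
  let filt : PySem.Dict String (List String) :=
    IPRdict.foldl (fun d kv =>
      if PySem.Set.contains pos_keys kv.1 && !(PySem.Set.contains neg_keys kv.1)
      then d.insert kv.1 kv.2 else d)
      PySem.Dict.empty
  filt.items

-- ===== PRECONDITION & SPEC =====
-- IPRdict is a Python dict, so its association-list image always has pairwise-distinct keys;
-- Pre_ states exactly that (no dict has duplicate keys), excluding only lists no dict produces.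
def Pre_IPR_filter (IPRdict : List (String × List String)) (pos_list : List String) (neg_list : List String) : Prop :=
  (IPRdict.map Prod.fst).Nodup
instance (IPRdict : List (String × List String)) (pos_list : List String) (neg_list : List String) : Decidable (Pre_IPR_filter IPRdict pos_list neg_list) := by unfold Pre_IPR_filter; infer_instance
def pvWitness_IPR_filter : (List (String × List String)) × List String × List String :=
  ([("o1", ["i1", "i2"]), ("o2", ["i3"]), ("o3", ["i1", "i3"])], ["i1"], ["i3"])

def Spec_IPR_filter (IPRdict : List (String × List String)) (pos_list : List String) (neg_list : List String) (out : List (String × List String)) : Prop := out = IPR_filter_alt IPRdict pos_list neg_list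
instance (IPRdict : List (String × List String)) (pos_list : List String) (neg_list : List String) (out : List (String × List String)) : Decidable (Spec_IPR_filter IPRdict pos_list neg_list out) := by unfold Spec_IPR_filter; infer_instance

-- ===== CLAIM =====
def Claim_equal_IPR_filter : Prop := ∀ (IPRdict : List (String × List String)) (pos_list : List String) (neg_list : List String), Dom_IPR_filter IPRdict pos_list neg_list → Pre_IPR_filter IPRdict pos_list neg_list → Spec_IPR_filter IPRdict pos_list neg_list (IPR_filter IPRdict pos_list neg_list)

-- ===== LEMMAS AND PROOFS =====

-- A conditional-insert fold over a list with fresh, pairwise-distinct keys builds exactly the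
-- filtered list (each insert appends).
theorem pv_build_items {ν : Type} (c : String × ν → Bool) :
    ∀ (l : List (String × ν)) (d : PySem.Dict String ν),
      (l.map Prod.fst).Nodup → (∀ kv ∈ l, d.contains kv.1 = false) →
      (l.foldl (fun d kv => if c kv then d.insert kv.1 kv.2 else d) d).items
        = d.items ++ l.filter c := by
  intro l
  induction l with
  | nil => intro d _ _; simp
  | cons kv rest ih =>
    intro d hnd hfresh
    simp only [List.map_cons, List.nodup_cons] at hnd
    simp only [List.foldl_cons, List.filter_cons]
    by_cases hc : c kv = true
    · rw [if_pos hc, ih _ hnd.2 ?fresh,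
          PySem.Dict.items_insert_of_not_contains d kv.2 (hfresh kv (by simp))]
      · simp [hc]
      case fresh =>
        intro kv' hkv'
        rw [PySem.Dict.contains_insert]
        have h1 : (kv'.1 == kv.1) = false := by
          simp only [beq_eq_false_iff_ne, ne_eq]
          intro h; exact hnd.1 (h ▸ List.mem_map_of_mem hkv')
        rw [h1, hfresh kv' (List.mem_cons_of_mem _ hkv')]; rfl
    · rw [if_neg hc, ih _ hnd.2 (fun kv' h => hfresh kv' (List.mem_cons_of_mem _ h))]
      simp [hc]

theorem pv_nonempty_inter (v : List String) (s : PySem.Set String) :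
    decide ((PySem.Set.inter (PySem.Set.ofList v) s).length > 0)
      = v.any (fun x => PySem.Set.contains s x) := by
  rcases h : v.any (fun x => PySem.Set.contains s x) with _ | _
  · simp only [List.any_eq_false] at h
    have : PySem.Set.inter (PySem.Set.ofList v) s = [] := by
      rw [List.eq_nil_iff_forall_not_mem]
      intro y hy
      rw [PySem.Set.mem_inter] at hy
      have := h y (by rw [← PySem.Set.mem_ofList (xs := v)]; exact hy.1)
      rw [PySem.Set.contains_iff] at this; exact this hy.2
    simp [this]
  · simp only [List.any_eq_true] at h
    obtain ⟨x, hx, hxs⟩ := h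
    rw [PySem.Set.contains_iff] at hxs
    have : x ∈ PySem.Set.inter (PySem.Set.ofList v) s := by
      rw [PySem.Set.mem_inter, PySem.Set.mem_ofList]; exact ⟨hx, hxs⟩
    have : 0 < (PySem.Set.inter (PySem.Set.ofList v) s).length := List.length_pos_of_mem this
    simpa using this

theorem pv_empty_inter (v : List String) (s : PySem.Set String) :
    decide ((PySem.Set.inter (PySem.Set.ofList v) s).length = 0)
      = !(v.any (fun x => PySem.Set.contains s x)) := by
  rw [← pv_nonempty_inter]
  rcases Nat.eq_zero_or_pos (PySem.Set.inter (PySem.Set.ofList v) s).length with h | h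
  · simp [h]
  · simp [Nat.pos_iff_ne_zero.mp h, h]

-- Membership in the union-of-index-buckets loop.
theorem pv_mem_fold_update (index : PySem.Dict String (List String)) :
    ∀ (sigs : List String) (s : PySem.Set String) (y : String),
      (y ∈ sigs.foldl (fun s sig => PySem.Set.update s (index.getD sig [])) s)
        ↔ y ∈ s ∨ ∃ sig ∈ sigs, y ∈ index.getD sig [] := by
  intro sigs
  induction sigs with
  | nil => simp
  | cons sig rest ih =>
    intro s y
    simp only [List.foldl_cons, ih, PySem.Set.mem_update, List.mem_cons]
    constructor
    · rintro ((h | h) | ⟨g, hg, hy⟩)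
      · exact Or.inl h
      · exact Or.inr ⟨sig, Or.inl rfl, h⟩
      · exact Or.inr ⟨g, Or.inr hg, hy⟩
    · rintro (h | ⟨g, (rfl | hg), hy⟩)
      · exact Or.inl (Or.inl h)
      · exact Or.inl (Or.inr hy)
      · exact Or.inr ⟨g, hg, hy⟩

-- Bucket contents of the inverted index.
theorem pv_mem_index (IPRdict : List (String × List String)) (sig key : String) :
    (key ∈ ((IPRdict.flatMap (fun kv => kv.2.map (fun s => (s, kv.1)))).foldl
        (fun d p => d.modify p.1 [] (· ++ [p.2])) PySem.Dict.empty).getD sig [])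
      ↔ ∃ kv ∈ IPRdict, kv.1 = key ∧ sig ∈ kv.2 := by
  rw [PySem.Dict.getD_foldl_modify_append]
  simp only [PySem.Dict.getD_empty, List.nil_append, List.mem_map, List.mem_filter,
    List.mem_flatMap]
  constructor
  · rintro ⟨p, ⟨⟨kv, hkv, s, hs, rfl⟩, hsig⟩, rfl⟩
    have hse : s = sig := by simpa using hsig
    exact ⟨kv, hkv, rfl, hse ▸ hs⟩
  · rintro ⟨kv, hkv, rfl, hs⟩
    exact ⟨(sig, kv.1), ⟨⟨kv, hkv, sig, hs, rfl⟩, by simp⟩, rfl⟩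

-- In a list with distinct keys, an entry is determined by its key.
theorem pv_key_unique {l : List (String × List String)} (h : (l.map Prod.fst).Nodup)
    {kv kv' : String × List String} (h1 : kv ∈ l) (h2 : kv' ∈ l) (he : kv'.1 = kv.1) :
    kv' = kv := by
  induction l with
  | nil => cases h1
  | cons a rest ih =>
    simp only [List.map_cons, List.nodup_cons] at h
    rcases List.mem_cons.mp h1 with rfl | h1' <;> rcases List.mem_cons.mp h2 with rfl | h2'
    · rfl
    · have hm : kv'.1 ∈ rest.map Prod.fst := List.mem_map_of_mem (f := Prod.fst) h2'
      rw [he] at hm; exact absurd hm h.1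
    · have hm : kv.1 ∈ rest.map Prod.fst := List.mem_map_of_mem (f := Prod.fst) h1'
      rw [← he] at hm; exact absurd hm h.1
    · exact ih h.2 h1' h2'

-- For an entry of a nodup-keyed dict, "key reached from sig_list via the index" is
-- exactly "some signature of this entry is in sig_list".
theorem pv_reached_iff (IPRdict : List (String × List String))
    (hnd : (IPRdict.map Prod.fst).Nodup) (sig_list : List String)
    {kv : String × List String} (hkv : kv ∈ IPRdict) :
    PySem.Set.contains
      ((PySem.List.dedup sig_list).foldl (fun s sig =>
        PySem.Set.update s
          (((IPRdict.flatMap (fun kv => kv.2.map (fun s => (s, kv.1)))).foldl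
              (fun d p => d.modify p.1 [] (· ++ [p.2])) PySem.Dict.empty).getD sig []))
        PySem.Set.empty) kv.1
      = kv.2.any (fun v => PySem.Set.contains (PySem.Set.ofList sig_list) v) := by
  rcases h : kv.2.any (fun v => PySem.Set.contains (PySem.Set.ofList sig_list) v) with _ | _
  · simp only [List.any_eq_false] at h
    rw [Bool.eq_false_iff, ne_eq, PySem.Set.contains_iff, pv_mem_fold_update]
    rintro (hmem | ⟨sig, hsig, hidx⟩)
    · simp [PySem.Set.empty] at hmem
    · rw [pv_mem_index] at hidx
      obtain ⟨kv', hkv', he, hs⟩ := hidx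
      have := pv_key_unique hnd hkv hkv' he
      subst this
      have := h sig hs
      rw [PySem.Set.contains_iff, PySem.Set.mem_ofList] at this
      exact this ((PySem.List.mem_dedup sig_list sig).mp hsig)
  · simp only [List.any_eq_true] at h
    obtain ⟨sig, hs, hc⟩ := h
    rw [PySem.Set.contains_iff, PySem.Set.mem_ofList] at hc
    rw [PySem.Set.contains_iff, pv_mem_fold_update]
    exact Or.inr ⟨sig, (PySem.List.mem_dedup sig_list sig).mpr hc,
      (pv_mem_index _ _ _).mpr ⟨kv, hkv, rfl, hs⟩⟩

-- ===== VERDICT (by name: the statement is the Claim_ definition above) =====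
theorem IPR_filter_spec : Claim_equal_IPR_filter := by
  intro IPRdict pos_list neg_list _ hpre
  unfold Spec_IPR_filter IPR_filter IPR_filter_alt
  dsimp only
  set P := fun kv : String × List String =>
    decide ((PySem.Set.inter (PySem.Set.ofList kv.2) (PySem.Set.ofList pos_list)).length > 0) with hP
  set Q := fun kv : String × List String =>
    decide ((PySem.Set.inter (PySem.Set.ofList kv.2) (PySem.Set.ofList neg_list)).length = 0) with hQ
  have hfoldP :
      (IPRdict.foldl (fun d kv =>
          if (PySem.Set.inter (PySem.Set.ofList kv.2) (PySem.Set.ofList pos_list)).length > 0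
          then d.insert kv.1 kv.2 else d) PySem.Dict.empty).items
        = IPRdict.filter P := by
    have := pv_build_items P IPRdict PySem.Dict.empty hpre (by intro kv _; rfl)
    simpa [hP, decide_eq_true_eq] using this
  have hfoldQ :
      ((IPRdict.filter P).foldl (fun d kv =>
          if (PySem.Set.inter (PySem.Set.ofList kv.2) (PySem.Set.ofList neg_list)).length = 0
          then d.insert kv.1 kv.2 else d) PySem.Dict.empty).items
        = (IPRdict.filter P).filter Q := by
    have hndP : ((IPRdict.filter P).map Prod.fst).Nodup := by
      have hsub : (IPRdict.filter P).Sublist IPRdict := List.filter_sublist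
      exact (hsub.map Prod.fst).nodup hpre
    have := pv_build_items Q (IPRdict.filter P) PySem.Dict.empty hndP (by intro kv _; rfl)
    simpa [hQ, decide_eq_true_eq] using this
  rw [hfoldP, hfoldQ, List.filter_filter]
  have hfoldB := pv_build_items (fun kv =>
      PySem.Set.contains
        ((PySem.List.dedup pos_list).foldl (fun s sig =>
          PySem.Set.update s
            (((IPRdict.flatMap (fun kv => kv.2.map (fun s => (s, kv.1)))).foldl
                (fun d p => d.modify p.1 [] (· ++ [p.2])) PySem.Dict.empty).getD sig []))
          PySem.Set.empty) kv.1
      && !(PySem.Set.contains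
        ((PySem.List.dedup neg_list).foldl (fun s sig =>
          PySem.Set.update s
            (((IPRdict.flatMap (fun kv => kv.2.map (fun s => (s, kv.1)))).foldl
                (fun d p => d.modify p.1 [] (· ++ [p.2])) PySem.Dict.empty).getD sig []))
          PySem.Set.empty) kv.1))
    IPRdict PySem.Dict.empty hpre (by intro kv _; rfl)
  simp only [show (PySem.Dict.empty : PySem.Dict String (List String)).items = [] from rfl,
    List.nil_append] at hfoldB
  rw [hfoldB]
  apply List.filter_congr
  intro kv hkv
  rw [hP, hQ]
  show (decide ((PySem.Set.inter (PySem.Set.ofList kv.2) (PySem.Set.ofList neg_list)).length = 0)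
        && decide ((PySem.Set.inter (PySem.Set.ofList kv.2) (PySem.Set.ofList pos_list)).length > 0)) = _
  rw [pv_empty_inter, pv_nonempty_inter, Bool.and_comm,
      pv_reached_iff IPRdict hpre pos_list hkv, pv_reached_iff IPRdict hpre neg_list hkv]
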